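-- pv_equiv track=rewrite | github.com/pvial00/Uvajda-Counter | bit_flip_counting_machine.py | succession_topA
-- ===== SOURCE A (Python) =====
-- def succession_topA(bitstream, threshold=4):
--     c = 0
--     s = 0
--     for bit in bitstream:
--         if bit == 1:
--             c += 1
--         else:
--             c = 0
--         if c >= threshold:
--             s = c
--     if c > 0 and s == 0:
--         return c
--     else:
--         return s
-- ===== SOURCE B (Python) =====
-- def _leading_ones(xs, i):
--     # length of the run of 1s in xs starting at position i
--     n = 0
--     while i < len(xs) and xs[i] == 1:
--         n += 1
--         i += 1
--     return n
--
--
-- def succession_topA(bitstream, threshold=4):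
--     # Scan from the end: the trailing run first, then earlier runs backwards,
--     # returning the first run (i.e. last in stream order) that meets the threshold.
--     rev = bitstream[::-1]
--     trailing = _leading_ones(rev, 0)
--     if trailing >= threshold:
--         return trailing
--     i = trailing
--     while i < len(rev):
--         if rev[i] == 1:
--             run = _leading_ones(rev, i)
--             if run >= threshold:
--                 return run
--             i += run
--         else:
--             i += 1
--     return trailing
-- ===== Notes on version B (the rewrite author's own statement) =====
-- stated objective: alternative
-- what changed: B scans the stream backwards: it measures the trailing run of ones first, returns it if it meets the threshold, and otherwise searches earlier runs back-to-front with an early exit at the first (i.e. last in stream order) qualifying run, instead of A's forward per-bit counter with per-bit threshold updates.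
import Mathlib
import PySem

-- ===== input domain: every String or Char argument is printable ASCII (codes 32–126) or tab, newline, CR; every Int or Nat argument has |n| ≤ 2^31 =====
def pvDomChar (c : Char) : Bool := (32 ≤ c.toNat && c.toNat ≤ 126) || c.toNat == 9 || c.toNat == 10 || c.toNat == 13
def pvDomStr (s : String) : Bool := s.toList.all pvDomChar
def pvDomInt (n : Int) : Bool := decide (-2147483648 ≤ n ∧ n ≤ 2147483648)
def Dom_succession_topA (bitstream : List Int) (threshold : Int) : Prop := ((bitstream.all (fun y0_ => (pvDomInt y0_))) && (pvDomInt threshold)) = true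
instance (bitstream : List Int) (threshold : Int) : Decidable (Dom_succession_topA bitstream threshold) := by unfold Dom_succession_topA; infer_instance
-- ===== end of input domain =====

-- B replaces A's forward per-bit counter by a backward scan: trailing run first, then earlier
-- runs back-to-front with an early exit at the first qualifying run (same O(n) cost, a
-- genuinely different traversal).

-- ===== PORT A =====
-- the for-loop over bitstream carrying (c, s)
def loopA (threshold : Int) : List Int → Int → Int → Int × Int
  | [], c, s => (c, s)
  | bit :: rest, c, s =>
      let c' : Int := if bit = 1 then c + 1 else 0
      loopA threshold rest c' (if threshold ≤ c' then c' else s)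

def succession_topA (bitstream : List Int) (threshold : Int) : Int :=
  let r := loopA threshold bitstream 0 0
  if 0 < r.1 ∧ r.2 = 0 then r.1 else r.2

-- ===== PORT B =====
-- _leading_ones: count of leading 1s
def leadingOnes : List Int → Nat
  | [] => 0
  | x :: xs => if x = 1 then leadingOnes xs + 1 else 0

-- the while loop over `rest`: returns the first run of ones meeting the threshold, if any
def findRun (th : Int) : List Int → Option Int
  | [] => none
  | x :: xs =>
      if hx : x = 1 then
        if th ≤ (leadingOnes (x :: xs) : Int) then some (leadingOnes (x :: xs) : Int)
        else findRun th ((x :: xs).drop (leadingOnes (x :: xs)))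
      else findRun th xs
termination_by l => l.length
decreasing_by
  · have h1 : 1 ≤ leadingOnes (x :: xs) := by simp [leadingOnes, hx]
    have h2 : ((x :: xs).drop (leadingOnes (x :: xs))).length = (x :: xs).length - leadingOnes (x :: xs) := List.length_drop
    simp only [h2, List.length_cons]
    omega
  · simp

def succession_topA_alt (bitstream : List Int) (threshold : Int) : Int :=
  let rev := bitstream.reverse
  let trailing := leadingOnes rev
  if threshold ≤ (trailing : Int) then (trailing : Int)
  else
    match findRun threshold (rev.drop trailing) with
    | some r => r
    | none => (trailing : Int)

-- ===== PRECONDITION & SPEC =====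
def Spec_succession_topA (bitstream : List Int) (threshold : Int) (out : Int) : Prop := out = succession_topA_alt bitstream threshold
instance (bitstream : List Int) (threshold : Int) (out : Int) : Decidable (Spec_succession_topA bitstream threshold out) := by unfold Spec_succession_topA; infer_instance

-- ===== CLAIM (what is proved, stated in full; the proofs are below) =====
def Claim_equal_succession_topA : Prop := ∀ (bitstream : List Int) (threshold : Int), Dom_succession_topA bitstream threshold → Spec_succession_topA bitstream threshold (succession_topA bitstream threshold)

-- ===== LEMMAS AND PROOFS =====

theorem loopA_nil (th c s : Int) : loopA th [] c s = (c, s) := rfl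
theorem loopA_cons (th bit c s : Int) (rest : List Int) :
    loopA th (bit :: rest) c s =
      loopA th rest (if bit = 1 then c + 1 else 0)
        (if th ≤ (if bit = 1 then c + 1 else 0) then (if bit = 1 then c + 1 else 0) else s) := rfl

theorem loopA_append (th : Int) (xs : List Int) : ∀ (ys : List Int) (c s : Int),
    loopA th (xs ++ ys) c s = loopA th ys (loopA th xs c s).1 (loopA th xs c s).2 := by
  induction xs with
  | nil => intro ys c s; rfl
  | cons b xs ih => intro ys c s; rw [List.cons_append, loopA_cons, ih, loopA_cons]

-- the s-component is glued to the c-component when the threshold is non-positive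
theorem loopA_snd_eq_fst (th : Int) (hth : th ≤ 0) : ∀ (xs : List Int) (c s : Int),
    0 ≤ c → xs ≠ [] → (loopA th xs c s).2 = (loopA th xs c s).1 := by
  intro xs
  induction xs with
  | nil => intro c s _ hne; exact absurd rfl hne
  | cons b xs ih =>
    intro c s hc _
    rw [loopA_cons]
    have hc2 : (0:Int) ≤ (if b = 1 then c + 1 else 0) := by split_ifs <;> omega
    have hth2 : th ≤ (if b = 1 then c + 1 else 0) := by omega
    rw [if_pos hth2]
    rcases xs with _ | ⟨b2, xs2⟩
    · rw [loopA_nil]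
    · exact ih _ _ hc2 (by simp)

theorem leadingOnes_cons_one (xs : List Int) : leadingOnes (1 :: xs) = leadingOnes xs + 1 := by
  simp [leadingOnes]

theorem leadingOnes_cons_ne (x : Int) (hx : x ≠ 1) (xs : List Int) : leadingOnes (x :: xs) = 0 := by
  simp [leadingOnes, hx]

-- head of a list with a positive leading-ones count is 1
theorem leadingOnes_pos_head (l : List Int) (h : 1 ≤ leadingOnes l) :
    ∃ l', l = 1 :: l' := by
  rcases l with _ | ⟨x, xs⟩
  · simp [leadingOnes] at h
  · by_cases hx : x = 1
    · exact ⟨xs, by rw [hx]⟩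
    · rw [leadingOnes_cons_ne x hx] at h; omega

theorem findRun_nil (th : Int) : findRun th [] = none := by rw [findRun]
theorem findRun_cons_ne (th : Int) (x : Int) (hx : x ≠ 1) (xs : List Int) :
    findRun th (x :: xs) = findRun th xs := by
  rw [findRun]; simp [hx]
theorem findRun_cons_one (th : Int) (xs : List Int) :
    findRun th (1 :: xs) =
      if th ≤ (leadingOnes (1 :: xs) : Int) then some (leadingOnes (1 :: xs) : Int)
      else findRun th ((1 :: xs).drop (leadingOnes (1 :: xs))) := by
  rw [findRun]; simp

-- skipping a non-qualifying leading run does not change findRun's answer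
theorem findRun_drop_leading (th : Int) (l : List Int)
    (h : ¬ th ≤ (leadingOnes l : Int)) :
    findRun th l = findRun th (l.drop (leadingOnes l)) := by
  rcases l with _ | ⟨x, xs⟩
  · rfl
  · by_cases hx : x = 1
    · subst hx
      rw [findRun_cons_one, if_neg h]
    · rw [leadingOnes_cons_ne x hx, List.drop_zero]

-- any answer of findRun meets the threshold
theorem findRun_pos (th : Int) : ∀ (n : Nat) (l : List Int), l.length ≤ n →
    ∀ r : Int, findRun th l = some r → th ≤ r := by
  intro n
  induction n with
  | zero =>
    intro l hl r h
    have : l = [] := List.eq_nil_of_length_eq_zero (Nat.le_zero.mp hl)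
    subst this; rw [findRun_nil] at h; exact absurd h (by simp)
  | succ n ih =>
    intro l hl r h
    rcases l with _ | ⟨x, xs⟩
    · rw [findRun_nil] at h; exact absurd h (by simp)
    · by_cases hx : x = 1
      · subst hx
        rw [findRun_cons_one] at h
        by_cases hq : th ≤ (leadingOnes (1 :: xs) : Int)
        · rw [if_pos hq] at h; injection h with h; omega
        · rw [if_neg hq] at h
          have hlen : ((1 :: xs).drop (leadingOnes (1 :: xs))).length ≤ n := by
            have h1 : 1 ≤ leadingOnes ((1:Int) :: xs) := by simp [leadingOnes]
            have h2 : ((1 :: xs).drop (leadingOnes ((1:Int) :: xs))).length = ((1:Int) :: xs).length - leadingOnes ((1:Int) :: xs) := List.length_drop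
            simp only [h2, List.length_cons]
            simp only [List.length_cons] at hl
            omega
          exact ih _ hlen r h
      · rw [findRun_cons_ne th x hx] at h
        exact ih xs (by simp at hl; omega) r h

-- B's selector: last qualifying run length, else 0
def sOf (th : Int) (l : List Int) : Int :=
  match findRun th l with
  | some r => r
  | none => 0

-- main correspondence for positive thresholds: A's loop state at the end is
-- (trailing count of the reverse, selector value on the reverse)
theorem loopA_main (th : Int) (hth : 1 ≤ th) : ∀ xs : List Int,
    loopA th xs 0 0 = ((leadingOnes xs.reverse : Int), sOf th xs.reverse) := by
  intro xs
  induction xs using List.reverseRecOn with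
  | nil => simp [loopA_nil, leadingOnes, sOf, findRun_nil]
  | append_singleton xs b ih =>
    rw [loopA_append, ih, List.reverse_append]
    simp only [List.reverse_cons, List.reverse_nil, List.nil_append, List.singleton_append]
    by_cases hb : b = 1
    · subst hb
      rw [loopA_cons, if_pos rfl, loopA_nil, leadingOnes_cons_one]
      have hcast : ((leadingOnes xs.reverse : Int) + 1) = ((leadingOnes xs.reverse + 1 : Nat) : Int) := by
        push_cast; ring
      by_cases hq : th ≤ (leadingOnes xs.reverse : Int) + 1
      · rw [if_pos hq]
        have : sOf th (1 :: xs.reverse) = ((leadingOnes xs.reverse + 1 : Nat) : Int) := by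
          unfold sOf
          rw [findRun_cons_one, leadingOnes_cons_one, if_pos (by push_cast; omega)]
        rw [this, hcast]
      · rw [if_neg hq]
        have hq' : ¬ th ≤ (leadingOnes xs.reverse : Int) := by omega
        have hdrop : findRun th (1 :: xs.reverse) = findRun th (xs.reverse.drop (leadingOnes xs.reverse)) := by
          rw [findRun_cons_one, leadingOnes_cons_one,
            if_neg (by push_cast; omega)]
          simp [List.drop_succ_cons]
        have hdrop2 := findRun_drop_leading th xs.reverse hq'
        have : sOf th (1 :: xs.reverse) = sOf th xs.reverse := by
          unfold sOf; rw [hdrop, ← hdrop2]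
        rw [this, hcast]
    · rw [loopA_cons, if_neg hb, loopA_nil, if_neg (by omega), leadingOnes_cons_ne b hb]
      have : sOf th (b :: xs.reverse) = sOf th xs.reverse := by
        unfold sOf; rw [findRun_cons_ne th b hb]
      rw [this]
      rfl

-- the c-component of A's loop is the leading-ones count of the reverse (any threshold)
theorem loopA_fst_rev (th : Int) : ∀ l : List Int, (loopA th l 0 0).1 = (leadingOnes l.reverse : Int) := by
  intro l
  induction l using List.reverseRecOn with
  | nil => simp [loopA_nil, leadingOnes]
  | append_singleton xs x ih =>
    rw [loopA_append, loopA_cons, loopA_nil, List.reverse_append]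
    simp only [List.reverse_cons, List.reverse_nil, List.nil_append, List.singleton_append]
    by_cases hx : x = 1
    · subst hx
      rw [leadingOnes_cons_one]
      simp only [if_true, reduceIte]
      rw [ih]
      push_cast; ring
    · rw [leadingOnes_cons_ne x hx]
      simp [hx]

-- ===== VERDICT (by name: the statement is the Claim_ definition above) =====
theorem succession_topA_spec : Claim_equal_succession_topA := by
  intro bs th _
  show succession_topA bs th = succession_topA_alt bs th
  simp only [succession_topA, succession_topA_alt]
  by_cases hth : 1 ≤ th
  · rw [loopA_main th hth bs]
    set t : Nat := leadingOnes bs.reverse with ht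
    by_cases hq : th ≤ (t : Int)
    · -- trailing run qualifies: findRun on the full reverse finds it first
      rw [if_pos hq]
      have hpos : 1 ≤ t := by omega
      obtain ⟨l', hl'⟩ := leadingOnes_pos_head bs.reverse (ht ▸ hpos)
      have hfr : findRun th bs.reverse = some (t : Int) := by
        rw [hl', findRun_cons_one, ← hl', ← ht, if_pos hq]
      have hs : sOf th bs.reverse = (t : Int) := by unfold sOf; rw [hfr]
      rw [hs, if_neg (by omega : ¬ (0 < (t:Int) ∧ (t:Int) = 0))]
    · rw [if_neg hq]
      have hdrop := findRun_drop_leading th bs.reverse hq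
      rcases hfr : findRun th (bs.reverse.drop t) with _ | r
      · have hs : sOf th bs.reverse = 0 := by unfold sOf; rw [hdrop, ← ht, hfr]
        simp only [hs]
        split_ifs with h1
        · rfl
        · simp only [and_true] at h1
          omega
      · have hr : th ≤ r := findRun_pos th (bs.reverse.drop t).length _ le_rfl r hfr
        have hs : sOf th bs.reverse = r := by unfold sOf; rw [hdrop, ← ht, hfr]
        simp only [hs]
        split_ifs with h1
        · obtain ⟨-, h2⟩ := h1
          omega
        · rfl
  · -- non-positive threshold: A's s equals its c, B returns the trailing count
    have hth0 : th ≤ 0 := by omega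
    have hB : th ≤ (leadingOnes bs.reverse : Int) := by
      have : (0:Int) ≤ (leadingOnes bs.reverse : Int) := by positivity
      omega
    rw [if_pos hB]
    rcases hbs : bs with _ | ⟨b, bs'⟩
    · simp [loopA_nil, leadingOnes]
    · have hsnd := loopA_snd_eq_fst th hth0 (b :: bs') 0 0 le_rfl (by simp)
      have hfst := loopA_fst_rev th (b :: bs')
      rw [hsnd, hfst]
      split_ifs <;> rfl
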